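-- pv_equiv track=rewrite | github.com/mhuncovsky/Codewars | solutions/base64.py | dec24b
-- ===== SOURCE A (Python) =====
-- def dec24b(s):
--     """ Helper function for from_base64 """
--     symbols = 'ABCDEFGHIJKLMNOPQRSTUVWXYZabcdefghijklmnopqrstuvwxyz0123456789+/'
--     pad = s.count('=')
--     s = [symbols.index(x) if x != '=' else 0 for x in s][::-1]
--
--     bb = 0
--     for i, x in enumerate(s):
--         bb |= (x << (i * 6))
--
--     ret = ''.join(chr((bb & 0xff << i * 8) >> i * 8) for i in range(2, -1, -1))
--     # ret = bytes(((bb & 0xff<<i*8) >> i*8) for i in range(2, -1, -1))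
--     return ret[:3 - pad]
-- ===== SOURCE B (Python) =====
-- def _bin6(v):
--     """ 6-bit binary representation of v (0 <= v < 64), most significant bit first """
--     return ''.join('1' if (v >> k) & 1 else '0' for k in range(5, -1, -1))
--
--
-- def _int2(bits):
--     """ Value of a string of '0'/'1' digits, most significant first """
--     n = 0
--     for c in bits:
--         n = n * 2 + (1 if c == '1' else 0)
--     return n
--
--
-- def dec24b(s):
--     """ Helper function for from_base64 """
--     symbols = 'ABCDEFGHIJKLMNOPQRSTUVWXYZabcdefghijklmnopqrstuvwxyz0123456789+/'
--     bits = ''.join(_bin6(0 if c == '=' else symbols.index(c)) for c in s)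
--     bits = ('0' * 24 + bits)[-24:]
--     ret = ''.join(chr(_int2(bits[k:k + 8])) for k in (0, 8, 16))
--     return ret[:3 - s.count('=')]
-- ===== Notes on version B (the rewrite author's own statement) =====
-- stated objective: alternative
-- what changed: B drops A's 24-bit integer accumulator entirely: it concatenates each character's six binary digits into a bit STRING, zero-pads it and keeps the last 24 digits, then reads the three output bytes off as 8-digit substrings parsed back to numbers, instead of A's reverse/enumerate OR-of-shifted-values loop and mask-then-shift byte extraction.
import Mathlib
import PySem

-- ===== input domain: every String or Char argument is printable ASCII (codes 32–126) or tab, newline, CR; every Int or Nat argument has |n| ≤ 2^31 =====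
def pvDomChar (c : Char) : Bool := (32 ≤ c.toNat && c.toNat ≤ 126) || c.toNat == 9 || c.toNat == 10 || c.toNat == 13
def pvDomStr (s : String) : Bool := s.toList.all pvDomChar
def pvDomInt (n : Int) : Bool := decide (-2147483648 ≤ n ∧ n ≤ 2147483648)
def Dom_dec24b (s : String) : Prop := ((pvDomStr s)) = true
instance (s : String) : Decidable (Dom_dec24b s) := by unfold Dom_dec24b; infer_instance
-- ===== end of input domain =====

-- B replaces A's integer bit-packing loop (reverse, enumerate, OR of shifted 6-bit values, then
-- mask-and-shift byte extraction) with a bit-STRING pipeline: each char becomes its 6 binary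
-- digits, the digit string is zero-padded and cut to its last 24 bits, and the three bytes are
-- read off as 8-digit substrings (objective: alternative).

-- the base64 alphabet (the literal both Pythons name `symbols`)
def pvSymbols : String := "ABCDEFGHIJKLMNOPQRSTUVWXYZabcdefghijklmnopqrstuvwxyz0123456789+/"

-- ===== PORT A =====
-- `symbols.index(x)` raises ValueError when x is absent; ported as index? with getD 0, with
-- exactly those inputs excluded by Pre_dec24b.
def dec24b (s : String) : String :=
  let pad : Nat := PySem.Str.count s "="
  let l : List Nat :=
    (s.toList.map (fun x => if x ≠ '=' then (PySem.List.index? pvSymbols.toList x).getD 0 else 0)).reverse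
  let bb : Nat :=
    (PySem.List.enumerate l).foldl (fun bb p => bb ||| (p.2 <<< (p.1.toNat * 6))) 0
  let ret : List Char :=
    (PySem.List.pyRange 2 (-1) (-1)).map
      (fun i => Char.ofNat ((bb &&& (0xff <<< (i.toNat * 8))) >>> (i.toNat * 8)))
  String.ofList (PySem.List.slice ret none (some ((3 : Int) - (pad : Int))))

-- ===== PORT B =====
-- _bin6(v): the 6 binary digits of v, most significant first (hand-written generator in Source B)
def pvBin6 (v : Nat) : List Char :=
  (PySem.List.pyRange 5 (-1) (-1)).map (fun k => if (v >>> k.toNat) &&& 1 = 1 then '1' else '0')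

-- _int2(bits): value of a '0'/'1' digit string, a plain accumulator loop as in Source B
def pvInt2 (bits : List Char) : Nat :=
  bits.foldl (fun n c => n * 2 + (if c = '1' then 1 else 0)) 0

-- `symbols.index(c)` raises ValueError when c is absent, ported as index? with getD 0 (excluded by Pre_dec24b)
def dec24b_alt (s : String) : String :=
  let bits : List Char :=
    (s.toList.map (fun c => pvBin6 (if c = '=' then 0 else (PySem.List.index? pvSymbols.toList c).getD 0))).flatten
  let bits24 : List Char := PySem.List.slice (List.replicate 24 '0' ++ bits) (some (-24)) none
  let ret : List Char :=
    ([0, 8, 16] : List Int).map (fun k => Char.ofNat (pvInt2 (PySem.List.slice bits24 (some k) (some (k + 8)))))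
  String.ofList (PySem.List.slice ret none (some ((3 : Int) - (PySem.Str.count s "=" : Int))))

-- ===== PRECONDITION & SPEC =====
-- Pre_: every character is a base64 symbol or '='; on any other character Python A raises
-- ValueError (symbols.index) — exactly the inputs on which A returns normally.
def Pre_dec24b (s : String) : Prop :=
  (s.toList.all fun c => PySem.Chars.isalnum c || c == '+' || c == '/' || c == '=') = true
instance (s : String) : Decidable (Pre_dec24b s) := by unfold Pre_dec24b; infer_instance
def pvWitness_dec24b : String := "TWE="

def Spec_dec24b (s : String) (out : String) : Prop := out = dec24b_alt s
instance (s : String) (out : String) : Decidable (Spec_dec24b s out) := by unfold Spec_dec24b; infer_instance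

-- ===== CLAIM (what is proved, stated in full; the proofs are below) =====
def Claim_equal_dec24b : Prop := ∀ (s : String), Dom_dec24b s → Pre_dec24b s → Spec_dec24b s (dec24b s)

-- ===== LEMMAS AND PROOFS =====
set_option maxRecDepth 8192

-- the big-endian 6-bit packing A's accumulation loop computes, in shift/or form …
def pvV : List Nat → Nat
  | [] => 0
  | x :: t => (x <<< (6 * t.length)) ||| pvV t

-- … and in base-64 positional form
def pvPack : List Nat → Nat
  | [] => 0
  | x :: t => x * 64 ^ t.length + pvPack t

-- A's reverse/enumerate OR-loop computes pvV
theorem pv_enum (l : List Nat) :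
    (PySem.List.enumerate l.reverse).foldl (fun b p => b ||| (p.2 <<< (p.1.toNat * 6))) 0 = pvV l := by
  induction l with
  | nil => simp [pvV]
  | cons x t ih =>
    simp only [List.reverse_cons, PySem.List.enumerate_append, List.foldl_append]
    simp only [PySem.List.enumerate_cons, PySem.List.enumerate_nil, List.foldl_cons, List.foldl_nil]
    rw [ih]
    simp [pvV, Nat.lor_comm, Nat.mul_comm]

theorem pvPack_lt (l : List Nat) (h : ∀ v ∈ l, v < 64) : pvPack l < 64 ^ l.length := by
  induction l with
  | nil => simp [pvPack]
  | cons x t ih =>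
    have hx : x < 64 := h x (by simp)
    have ht := ih (fun v hv => h v (by simp [hv]))
    have hP : 0 < 64 ^ t.length := Nat.pow_pos (by omega)
    simp only [pvPack, List.length_cons, pow_succ]
    have h1 : x * 64 ^ t.length + pvPack t < (x + 1) * 64 ^ t.length := by nlinarith
    have h2 : (x + 1) * 64 ^ t.length ≤ 64 ^ t.length * 64 := by
      rw [Nat.mul_comm (64 ^ t.length) 64]
      exact Nat.mul_le_mul_right _ (by omega)
    omega

theorem pv_or_add (x b n : Nat) (hb : b < 2 ^ n) : (x <<< n) ||| b = x * 2 ^ n + b := by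
  have h : x * 2 ^ n + b = 2 ^ n * x + b := by ring
  rw [h]
  apply Nat.eq_of_testBit_eq
  intro i
  rw [Nat.testBit_two_pow_mul_add x hb i, Nat.testBit_or, Nat.testBit_shiftLeft]
  by_cases hi : i < n
  · simp [hi, Nat.not_le.mpr hi]
  · have hb' : b.testBit i = false :=
      Nat.testBit_lt_two_pow (lt_of_lt_of_le hb (Nat.pow_le_pow_right (by omega) (by omega)))
    simp [hi, Nat.le_of_not_lt hi, hb']

theorem pvV_eq_pack (l : List Nat) (h : ∀ v ∈ l, v < 64) : pvV l = pvPack l := by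
  induction l with
  | nil => rfl
  | cons x t ih =>
    have ht : ∀ v ∈ t, v < 64 := fun v hv => h v (by simp [hv])
    have hp : (64 : Nat) ^ t.length = 2 ^ (6 * t.length) := by
      rw [pow_mul]; norm_num
    have hlt : pvPack t < 2 ^ (6 * t.length) := hp ▸ pvPack_lt t ht
    show (x <<< (6 * t.length)) ||| pvV t = x * 64 ^ t.length + pvPack t
    rw [ih ht, pv_or_add _ _ _ hlt, hp]

-- generalized accumulator form of _int2
theorem pvInt2_go (bits : List Char) (n : Nat) :
    bits.foldl (fun n c => n * 2 + (if c = '1' then 1 else 0)) n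
      = n * 2 ^ bits.length + pvInt2 bits := by
  induction bits generalizing n with
  | nil => simp [pvInt2]
  | cons c t ih =>
    simp only [List.foldl_cons, pvInt2, List.length_cons, Nat.zero_mul, Nat.zero_add]
    rw [ih, ih (if c = '1' then 1 else 0)]
    ring

theorem pvInt2_append (a b : List Char) :
    pvInt2 (a ++ b) = pvInt2 a * 2 ^ b.length + pvInt2 b := by
  unfold pvInt2
  rw [List.foldl_append, pvInt2_go]
  rfl

theorem pvInt2_lt (bits : List Char) : pvInt2 bits < 2 ^ bits.length := by
  induction bits with
  | nil => simp [pvInt2]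
  | cons c t ih =>
    have : pvInt2 (c :: t) = (if c = '1' then 1 else 0) * 2 ^ t.length + pvInt2 t := by
      show List.foldl _ _ (c :: t) = _
      simp only [List.foldl_cons, Nat.zero_mul, Nat.zero_add]
      rw [pvInt2_go]
    rw [this]
    simp only [List.length_cons, pow_succ]
    split <;> omega

theorem pvBin6_length (v : Nat) : (pvBin6 v).length = 6 := by
  simp [pvBin6]

theorem pv_ite_mod2 (x : Nat) : (if x % 2 = 1 then (1 : Nat) else 0) = x % 2 := by
  rcases Nat.mod_two_eq_zero_or_one x with h | h <;> simp [h]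

theorem pvInt2_bin6 (v : Nat) : pvInt2 (pvBin6 v) = v % 64 := by
  have hr : PySem.List.pyRange 5 (-1) (-1) = [5, 4, 3, 2, 1, 0] := by decide
  have hc : ∀ c : Int, (if (if v >>> c.toNat &&& 1 = 1 then '1' else '0') = '1' then (1 : Nat) else 0)
      = v / 2 ^ c.toNat % 2 := by
    intro c
    have h2 : v >>> c.toNat &&& 1 = v / 2 ^ c.toNat % 2 := by
      rw [Nat.and_one_is_mod, Nat.shiftRight_eq_div_pow]
    rw [h2, ← pv_ite_mod2 (v / 2 ^ c.toNat)]
    split_ifs <;> simp_all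
  simp only [pvBin6, hr, List.map_cons, List.map_nil, pvInt2, List.foldl_cons,
    List.foldl_nil, Nat.zero_mul, Nat.zero_add, hc]
  simp only [Int.reduceToNat]
  norm_num
  omega

theorem pvInt2_replicate_zero (n : Nat) : pvInt2 (List.replicate n '0') = 0 := by
  induction n with
  | zero => rfl
  | succ k ih =>
    rw [List.replicate_succ]
    unfold pvInt2 at *
    simp [ih]

-- value of B's concatenated bit string
theorem pv_flat (l : List Nat) (h : ∀ v ∈ l, v < 64) :
    pvInt2 ((l.map pvBin6).flatten) = pvPack l ∧ ((l.map pvBin6).flatten).length = 6 * l.length := by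
  induction l with
  | nil => simp [pvInt2, pvPack]
  | cons x t ih =>
    obtain ⟨ihv, ihl⟩ := ih (fun v hv => h v (by simp [hv]))
    have hx : x < 64 := h x (by simp)
    constructor
    · rw [List.map_cons, List.flatten_cons, pvInt2_append, ihv, ihl, pvInt2_bin6,
        Nat.mod_eq_of_lt hx]
      show _ = x * 64 ^ t.length + pvPack t
      rw [pow_mul]; norm_num
    · simp [List.flatten_cons, ihl, pvBin6_length]
      ring

-- every per-character value is < 64 (index into the 64-symbol alphabet, or 0)
theorem pv_val_lt (c : Char) :
    (if c = '=' then 0 else (PySem.List.index? pvSymbols.toList c).getD 0) < 64 := by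
  split_ifs
  · omega
  · cases hk : PySem.List.index? pvSymbols.toList c with
    | none => simp
    | some k =>
      obtain ⟨hlt, -, -⟩ := PySem.List.getElem_of_index?_eq_some hk
      have : pvSymbols.toList.length = 64 := by decide
      simp only [Option.getD_some]
      omega

-- A's per-character value expression equals B's
theorem pv_val_eq (c : Char) :
    (if c ≠ '=' then (PySem.List.index? pvSymbols.toList c).getD 0 else 0)
      = (if c = '=' then 0 else (PySem.List.index? pvSymbols.toList c).getD 0) := by
  by_cases h : c = '=' <;> simp [h]

-- A's mask-then-shift byte equals shift-then-mask
theorem pv_mask (bb k : Nat) : (bb &&& (0xff <<< k)) >>> k = (bb >>> k) &&& 0xff := by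
  apply Nat.eq_of_testBit_eq
  intro i
  simp [Nat.testBit_and, Nat.testBit_shiftRight, Nat.testBit_shiftLeft]

-- the last 24 digits of the zero-padded bit string: length 24 and value mod 2^24
theorem pv_tail24 (bits : List Char) :
    ((List.replicate 24 '0' ++ bits).drop ((List.replicate 24 '0' ++ bits).length - 24)).length = 24 ∧
    pvInt2 ((List.replicate 24 '0' ++ bits).drop ((List.replicate 24 '0' ++ bits).length - 24))
      = pvInt2 bits % 2 ^ 24 := by
  set w := List.replicate 24 '0' ++ bits with hw
  have hwlen : w.length = 24 + bits.length := by simp [hw]; omega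
  have hlen : (w.drop (w.length - 24)).length = 24 := by
    rw [List.length_drop]; omega
  refine ⟨hlen, ?_⟩
  have hsplit : w.take (w.length - 24) ++ w.drop (w.length - 24) = w := List.take_append_drop _ _
  have hval : pvInt2 w = pvInt2 (w.take (w.length - 24)) * 2 ^ 24 + pvInt2 (w.drop (w.length - 24)) := by
    conv_lhs => rw [← hsplit]
    rw [pvInt2_append, hlen]
  have hvw : pvInt2 w = pvInt2 bits := by
    rw [hw, pvInt2_append, pvInt2_replicate_zero]
    ring
  have hlt : pvInt2 (w.drop (w.length - 24)) < 2 ^ 24 := by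
    have := pvInt2_lt (w.drop (w.length - 24))
    rwa [hlen] at this
  omega

-- the three 8-digit chunks of a 24-digit string carry its three bytes
theorem pv_chunk3 (u : List Char) (hlen : u.length = 24) :
    pvInt2 (u.take 8) = pvInt2 u / 65536 ∧
    pvInt2 ((u.drop 8).take 8) = pvInt2 u / 256 % 256 ∧
    pvInt2 ((u.drop 16).take 8) = pvInt2 u % 256 := by
  have h0 : (u.take 8).length = 8 := by rw [List.length_take]; omega
  have hr : (u.drop 8).length = 16 := by rw [List.length_drop]; omega
  have h1 : ((u.drop 8).take 8).length = 8 := by rw [List.length_take]; omega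
  have h2 : ((u.drop 8).drop 8).length = 8 := by simp; omega
  have hdd : (u.drop 8).drop 8 = u.drop 16 := by rw [List.drop_drop]
  have htk : (u.drop 16).take 8 = u.drop 16 := by
    apply List.take_of_length_le
    rw [List.length_drop]; omega
  have hu : pvInt2 u = pvInt2 (u.take 8) * 2 ^ 16 + pvInt2 (u.drop 8) := by
    conv_lhs => rw [← List.take_append_drop 8 u]
    rw [pvInt2_append, hr]
  have hr8 : pvInt2 (u.drop 8) = pvInt2 ((u.drop 8).take 8) * 2 ^ 8 + pvInt2 (u.drop 16) := by
    conv_lhs => rw [← List.take_append_drop 8 (u.drop 8)]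
    rw [pvInt2_append, hdd, List.length_drop, hlen]
  have l0 : pvInt2 (u.take 8) < 2 ^ 8 := by have := pvInt2_lt (u.take 8); rwa [h0] at this
  have l1 : pvInt2 ((u.drop 8).take 8) < 2 ^ 8 := by
    have := pvInt2_lt ((u.drop 8).take 8); rwa [h1] at this
  have l2 : pvInt2 (u.drop 16) < 2 ^ 8 := by
    have := pvInt2_lt (u.drop 16)
    rw [List.length_drop, hlen] at this
    norm_num at this
    exact this
  refine ⟨by omega, by omega, by rw [htk]; omega⟩

-- ===== VERDICT (by name: the statement is the Claim_ definition above) =====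
theorem dec24b_spec : Claim_equal_dec24b := by
  intro s _ _
  unfold Spec_dec24b dec24b dec24b_alt
  simp only []
  -- the two per-character value lists agree
  have hmap : s.toList.map (fun x => if x ≠ '=' then (PySem.List.index? pvSymbols.toList x).getD 0 else 0)
      = s.toList.map (fun c => if c = '=' then 0 else (PySem.List.index? pvSymbols.toList c).getD 0) :=
    List.map_congr_left (fun c _ => pv_val_eq c)
  set l : List Nat := s.toList.map (fun c => if c = '=' then 0 else (PySem.List.index? pvSymbols.toList c).getD 0) with hl
  have hlt64 : ∀ v ∈ l, v < 64 := by
    rw [hl]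
    intro v hv
    obtain ⟨c, -, rfl⟩ := List.mem_map.mp hv
    exact pv_val_lt c
  -- A's accumulator is the base-64 packing of l
  have hbb : (PySem.List.enumerate ((s.toList.map (fun x => if x ≠ '=' then (PySem.List.index? pvSymbols.toList x).getD 0 else 0)).reverse)).foldl
        (fun bb p => bb ||| (p.2 <<< (p.1.toNat * 6))) 0 = pvPack l := by
    rw [hmap, pv_enum l, pvV_eq_pack l hlt64]
  -- B's bit string is the binary expansion of the same packing
  have hbits : (s.toList.map (fun c => pvBin6 (if c = '=' then 0 else (PySem.List.index? pvSymbols.toList c).getD 0))).flatten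
      = (l.map pvBin6).flatten := by rw [hl, List.map_map]; simp [Function.comp_def]
  obtain ⟨hfv, hfl⟩ := pv_flat l hlt64
  -- B's 24-digit window
  have hslice : PySem.List.slice (List.replicate 24 '0' ++ (l.map pvBin6).flatten) (some (-24)) none
      = (List.replicate 24 '0' ++ (l.map pvBin6).flatten).drop
          ((List.replicate 24 '0' ++ (l.map pvBin6).flatten).length - 24) :=
    PySem.List.slice_from_neg_ofNat _ 24 (by omega)
  obtain ⟨hu24, huval⟩ := pv_tail24 ((l.map pvBin6).flatten)
  set u : List Char := (List.replicate 24 '0' ++ (l.map pvBin6).flatten).drop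
      ((List.replicate 24 '0' ++ (l.map pvBin6).flatten).length - 24) with hu
  obtain ⟨hc0, hc1, hc2⟩ := pv_chunk3 u hu24
  -- B's three slices in drop/take form
  have hs0 : PySem.List.slice u (some 0) (some (0 + 8)) = u.take 8 := by
    rw [PySem.List.slice_toNat u (by omega) (by omega)]
    simp
  have hs1 : PySem.List.slice u (some 8) (some (8 + 8)) = (u.drop 8).take 8 := by
    rw [PySem.List.slice_toNat u (by omega) (by omega)]
    simp
  have hs2 : PySem.List.slice u (some 16) (some (16 + 8)) = (u.drop 16).take 8 := by
    rw [PySem.List.slice_toNat u (by omega) (by omega)]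
    simp
  -- A's three bytes of bb equal B's three chunk values
  have hN : pvInt2 u = pvPack l % 2 ^ 24 := by rw [huval, hfv]
  have hmask : ∀ k : Nat, (pvPack l &&& (0xff <<< k)) >>> k = pvPack l / 2 ^ k % 256 := by
    intro k
    rw [pv_mask]
    have : (0xff : Nat) = 2 ^ 8 - 1 := by norm_num
    rw [this, Nat.and_two_pow_sub_one_eq_mod, Nat.shiftRight_eq_div_pow]
  have hrange : PySem.List.pyRange 2 (-1) (-1) = [2, 1, 0] := by decide
  rw [hbits, hslice, hbb, hrange]
  simp only [List.map_cons, List.map_nil, Int.reduceToNat, hs0, hs1, hs2, hc0, hc1, hc2, hmask]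
  have hN' : pvInt2 u = pvPack l % 16777216 := by rw [hN]; norm_num
  have e2 : pvPack l / 65536 % 256 = pvInt2 u / 65536 := by rw [hN']; omega
  have e1 : pvPack l / 256 % 256 = pvInt2 u / 256 % 256 := by rw [hN']; omega
  have e0 : pvPack l % 256 = pvInt2 u % 256 := by rw [hN']; omega
  norm_num [e2, e1, e0]
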